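-- pv_equiv track=rewrite | github.com/pypi-data/pypi-mirror-374 | packages/mayatk/mayatk-0.9.35.tar.gz/mayatk-0.9.35/mayatk/env_utils/reference_manager.py | _extract_strip_pattern
-- ===== SOURCE A (Python) =====
-- def _extract_strip_pattern(filter_text: str) -> str:
--     """Extract the core pattern to strip from wildcard filter text.
--
--     For example:
--     - '*_v001*' -> '_v001'
--     - 'character_*' -> 'character_'
--     - '*' -> '' (empty string)
--     - 'literal_text' -> 'literal_text'
--     - 'test_*_rig' -> 'test_' and '_rig' (but we'll take the longest contiguous part)
--     """
--     if not filter_text: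
--         return ""
--
--     # Remove leading and trailing wildcards to get the core pattern
--     pattern = filter_text
--
--     # If pattern is just wildcards, return empty string
--     if pattern.replace("*", "").replace("?", "") == "":
--         return ""
--
--     # Remove leading wildcards
--     while pattern.startswith("*") or pattern.startswith("?"):
--         pattern = pattern[1:]
--
--     # Remove trailing wildcards
--     while pattern.endswith("*") or pattern.endswith("?"):
--         pattern = pattern[:-1]
--
--     # If there are still wildcards in the middle, take the longest contiguous part
--     if "*" in pattern or "?" in pattern:
--         # Split by wildcards and find the longest part
--         parts = [part for part in pattern.replace("?", "*").split("*") if part]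
--         if parts:
--             pattern = max(parts, key=len)
--         else:
--             pattern = ""
--
--     return pattern
-- ===== SOURCE B (Python) =====
-- def _extract_strip_pattern(filter_text: str) -> str:
--     # One left-to-right pass: collect maximal runs of non-wildcard characters,
--     # then return the first longest run (or "" when there is none).
--     segments = []
--     cur = ""
--     for ch in filter_text:
--         if ch in "*?":
--             if cur:
--                 segments.append(cur)
--             cur = ""
--         else:
--             cur += ch
--     if cur:
--         segments.append(cur)
--     return max(segments, key=len, default="")
-- ===== Notes on version B (the rewrite author's own statement) =====
-- stated objective: simpler
-- what changed: Replaced A's two wildcard-stripping while-loops, the replace-based all-wildcard guard and the conditional split-and-max with one linear scan that collects maximal non-wildcard runs and returns the first longest one.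
import Mathlib
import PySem

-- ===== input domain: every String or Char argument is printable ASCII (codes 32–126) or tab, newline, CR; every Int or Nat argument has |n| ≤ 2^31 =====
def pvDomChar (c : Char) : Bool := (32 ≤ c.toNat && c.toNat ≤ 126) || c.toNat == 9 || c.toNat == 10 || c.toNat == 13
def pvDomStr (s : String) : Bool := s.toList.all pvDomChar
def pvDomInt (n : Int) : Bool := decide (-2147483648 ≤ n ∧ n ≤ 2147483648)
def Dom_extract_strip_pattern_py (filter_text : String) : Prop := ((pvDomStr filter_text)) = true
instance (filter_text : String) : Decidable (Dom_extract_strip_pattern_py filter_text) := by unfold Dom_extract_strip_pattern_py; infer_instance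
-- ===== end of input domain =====

-- B replaces A's two wildcard-stripping while-loops, the replace-based all-wildcard guard and the
-- conditional split-and-max by one linear scan collecting the maximal non-wildcard runs and
-- returning the first longest one (objective: simpler).


-- ===== PORT A =====
-- two general slice facts the while-loop ports cite for termination
theorem pvSliceFromOne (p : List Char) : PySem.List.slice p (some 1) none = p.drop 1 :=
  PySem.List.slice_from p (by norm_num)

theorem pvSliceToNegOne (p : List Char) : PySem.List.slice p none (some (-1)) = p.dropLast := by
  rcases p with _ | ⟨c, t⟩
  · rfl
  · simp only [PySem.List.slice, PySem.List.clampIdx]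
    norm_num
    rw [List.dropLast_eq_take]
    congr 1

-- `while pattern.startswith("*") or pattern.startswith("?"): pattern = pattern[1:]`
def pvLeadLoop (p : List Char) : List Char :=
  if PySem.Chars.startswith p ['*'] || PySem.Chars.startswith p ['?'] then
    pvLeadLoop (PySem.List.slice p (some 1) none)
  else p
termination_by p.length
decreasing_by
  rw [pvSliceFromOne]
  rcases p with _ | ⟨c, t⟩
  · simp_all [PySem.Chars.startswith, List.isPrefixOf]
  · simp

-- `while pattern.endswith("*") or pattern.endswith("?"): pattern = pattern[:-1]`
def pvTrailLoop (p : List Char) : List Char :=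
  if PySem.Chars.endswith p ['*'] || PySem.Chars.endswith p ['?'] then
    pvTrailLoop (PySem.List.slice p none (some (-1)))
  else p
termination_by p.length
decreasing_by
  rw [pvSliceToNegOne]
  rcases p with _ | ⟨c, t⟩
  · simp_all [PySem.Chars.endswith, List.isSuffixOf]
  · simp

def extract_strip_pattern_py (filter_text : String) : String :=
  if filter_text = "" then ""
  else if PySem.Str.replace (PySem.Str.replace filter_text "*" "") "?" "" = "" then ""
  else
    let pattern := pvTrailLoop (pvLeadLoop filter_text.toList)
    if PySem.Chars.isIn ['*'] pattern || PySem.Chars.isIn ['?'] pattern then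
      let parts := (PySem.Chars.splitOn (PySem.Chars.replace pattern ['?'] ['*']) ['*']).filter
        (fun part => !part.isEmpty)
      if !parts.isEmpty then String.ofList (PySem.List.maxD parts (fun part => part.length) [])
      else ""
    else String.ofList pattern

-- ===== PORT B =====
-- `ch in "*?"` on a single character is membership of {'*', '?'}
def pvWch (c : Char) : Bool := c == '*' || c == '?'

-- B's single pass: the `segments`/`cur` accumulator loop over the characters
def pvSegsLoop : List Char → List (List Char) → List Char → List (List Char)
  | [], segs, cur => if cur.isEmpty then segs else segs ++ [cur]
  | c :: t, segs, cur =>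
    if pvWch c then pvSegsLoop t (if cur.isEmpty then segs else segs ++ [cur]) []
    else pvSegsLoop t segs (cur ++ [c])

def extract_strip_pattern_py_alt (filter_text : String) : String :=
  String.ofList (PySem.List.maxD (pvSegsLoop filter_text.toList [] []) (fun seg => seg.length) [])

-- ===== PRECONDITION & SPEC =====
def Spec_extract_strip_pattern_py (filter_text : String) (out : String) : Prop := out = extract_strip_pattern_py_alt filter_text
instance (filter_text : String) (out : String) : Decidable (Spec_extract_strip_pattern_py filter_text out) := by unfold Spec_extract_strip_pattern_py; infer_instance

-- ===== CLAIM (what is proved, stated in full; the proofs are below) =====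
def Claim_equal_extract_strip_pattern_py : Prop := ∀ (filter_text : String), Dom_extract_strip_pattern_py filter_text → Spec_extract_strip_pattern_py filter_text (extract_strip_pattern_py filter_text)

-- ===== LEMMAS AND PROOFS =====

-- the maximal non-wildcard runs of `l`, preceded by a pending (wildcard-free, already read) run `cur`
def pvChunksW : List Char → List Char → List (List Char)
  | cur, [] => if cur = [] then [] else [cur]
  | cur, c :: t =>
    if pvWch c then (if cur = [] then [] else [cur]) ++ pvChunksW [] t
    else pvChunksW (cur ++ [c]) t

theorem pvChunksW_lead_aux : ∀ (n : Nat) (p : List Char), p.length ≤ n →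
    pvChunksW [] (pvLeadLoop p) = pvChunksW [] p := by
  intro n
  induction n with
  | zero =>
    intro p h
    have hp : p = [] := List.length_eq_zero_iff.mp (by omega)
    subst hp
    rw [pvLeadLoop]
    simp [PySem.Chars.startswith, List.isPrefixOf]
  | succ n ih =>
    intro p h
    rw [pvLeadLoop]
    by_cases hs : (PySem.Chars.startswith p ['*'] || PySem.Chars.startswith p ['?']) = true
    · rw [if_pos hs, pvSliceFromOne]
      rcases p with _ | ⟨c, t⟩
      · simp [PySem.Chars.startswith, List.isPrefixOf] at hs
      · have hc : pvWch c := by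
          rcases Bool.or_eq_true_iff.mp hs with h' | h' <;>
            simp [PySem.Chars.startswith, List.isPrefixOf] at h' <;> simp [pvWch, h'.symm]
        rw [List.drop_one, List.tail_cons]
        rw [ih t (by simpa using Nat.le_of_succ_le_succ h)]
        simp [pvChunksW, hc]
    · rw [if_neg hs]

theorem pvChunksW_append_wild {c : Char} (h : pvWch c) : ∀ (l cur : List Char),
    pvChunksW cur (l ++ [c]) = pvChunksW cur l := by
  intro l
  induction l with
  | nil => intro cur; by_cases hc : cur = [] <;> simp [pvChunksW, h, hc]
  | cons a t ih =>
    intro cur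
    by_cases ha : pvWch a <;> simp [pvChunksW, ha, ih]

theorem pvChunksW_trail_aux : ∀ (n : Nat) (p : List Char), p.length ≤ n →
    pvChunksW [] (pvTrailLoop p) = pvChunksW [] p := by
  intro n
  induction n with
  | zero =>
    intro p h
    have hp : p = [] := List.length_eq_zero_iff.mp (by omega)
    subst hp
    rw [pvTrailLoop]
    simp [PySem.Chars.endswith, List.isSuffixOf]
  | succ n ih =>
    intro p h
    rw [pvTrailLoop]
    by_cases hs : (PySem.Chars.endswith p ['*'] || PySem.Chars.endswith p ['?']) = true
    · rw [if_pos hs, pvSliceToNegOne]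
      have hne : p ≠ [] := by
        rintro rfl
        simp [PySem.Chars.endswith, List.isSuffixOf] at hs
      have hc : pvWch (p.getLast hne) := by
        rcases Bool.or_eq_true_iff.mp hs with h' | h' <;>
          rw [PySem.Chars.endswith, List.isSuffixOf_iff_suffix] at h'
        · rcases h' with ⟨q, hq⟩
          have hg : p.getLast hne = '*' := by subst hq; simp
          simp [hg, pvWch]
        · rcases h' with ⟨q, hq⟩
          have hg : p.getLast hne = '?' := by subst hq; simp
          simp [hg, pvWch]
      have hlen : p.dropLast.length ≤ n := by
        have := List.length_pos_iff.mpr hne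
        simp [List.length_dropLast]; omega
      rw [ih _ hlen]
      conv_rhs => rw [← List.dropLast_append_getLast hne]
      rw [pvChunksW_append_wild hc]
    · rw [if_neg hs]

theorem pvReplaceGo_single (c : Char) (new : List Char) : ∀ (fuel : Nat) (l acc : List Char),
    l.length ≤ fuel →
    PySem.Chars.replace.go [c] new fuel l acc
      = acc.reverse ++ l.flatMap (fun a => if a = c then new else [a]) := by
  intro fuel
  induction fuel with
  | zero =>
    intro l acc h
    have hl : l = [] := List.length_eq_zero_iff.mp (by omega)
    subst hl; simp [PySem.Chars.replace.go]
  | succ n ih =>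
    intro l acc h
    rcases l with _ | ⟨a, t⟩
    · simp [PySem.Chars.replace.go]
    · simp only [List.length_cons] at h
      by_cases hac : c = a
      · subst hac
        rw [PySem.Chars.replace.go, if_pos (by simp [List.isPrefixOf])]
        rw [List.length_singleton, List.drop_one, List.tail_cons]
        rw [ih _ _ (by omega)]
        simp
      · rw [PySem.Chars.replace.go,
          if_neg (by simp [List.isPrefixOf]; exact fun h' => absurd h' hac)]
        rw [ih _ _ (by omega)]
        simp [Ne.symm hac]

theorem pvReplace_single (c : Char) (new : List Char) (l : List Char) :
    PySem.Chars.replace l [c] new = l.flatMap (fun a => if a = c then new else [a]) := by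
  rw [PySem.Chars.replace, if_neg (by simp)]
  simpa using pvReplaceGo_single c new l.length l [] (le_refl _)

theorem pvReplace_filter (c : Char) (l : List Char) :
    PySem.Chars.replace l [c] [] = l.filter (fun a => a != c) := by
  rw [pvReplace_single]
  induction l with
  | nil => simp
  | cons a t ih => by_cases h : a = c <;> simp [h, ih]

theorem pvReplace_map (l : List Char) :
    PySem.Chars.replace l ['?'] ['*'] = l.map (fun a => if a = '?' then '*' else a) := by
  rw [pvReplace_single]
  induction l with
  | nil => simp
  | cons a t ih => by_cases h : a = '?' <;> simp [h, ih]

theorem pvCheck_iff (s : String) :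
    (PySem.Str.replace (PySem.Str.replace s "*" "") "?" "" = "")
      ↔ ∀ c ∈ s.toList, pvWch c := by
  rw [← String.toList_eq_nil_iff]
  rw [show (PySem.Str.replace (PySem.Str.replace s "*" "") "?" "").toList
      = PySem.Chars.replace (PySem.Chars.replace s.toList ['*'] []) ['?'] [] by
    rw [PySem.Str.toList_replace, PySem.Str.toList_replace,
      show ("*" : String).toList = ['*'] from by decide,
      show ("?" : String).toList = ['?'] from by decide,
      show ("" : String).toList = [] from by decide]]
  rw [pvReplace_filter, pvReplace_filter, List.filter_filter, List.filter_eq_nil_iff]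
  constructor
  · intro h c hc
    have := h c hc
    simp [pvWch] at this ⊢
    tauto
  · intro h c hc
    have := h c hc
    simp [pvWch] at this ⊢
    tauto

-- `pattern.split("*")` with a pending reversed prefix `cur`
def pvSp : List Char → List Char → List (List Char)
  | cur, [] => [cur.reverse]
  | cur, c :: t => if c = '*' then cur.reverse :: pvSp [] t else pvSp (c :: cur) t

theorem pvSplitGo : ∀ (fuel : Nat) (l cur : List Char) (acc : List (List Char)),
    l.length < fuel →
    PySem.Chars.splitOn.go ['*'] fuel l cur acc = acc.reverse ++ pvSp cur l := by
  intro fuel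
  induction fuel with
  | zero => intro l cur acc h; omega
  | succ n ih =>
    intro l cur acc h
    rcases l with _ | ⟨c, t⟩
    · simp [PySem.Chars.splitOn.go, pvSp]
    · simp only [List.length_cons] at h
      by_cases hc : c = '*'
      · subst hc
        rw [PySem.Chars.splitOn.go, if_pos (by simp [List.isPrefixOf])]
        rw [List.length_singleton, List.drop_one, List.tail_cons]
        rw [ih _ _ _ (by omega)]
        simp [pvSp]
      · rw [PySem.Chars.splitOn.go,
          if_neg (by simp [List.isPrefixOf]; exact fun h' => absurd h'.symm hc)]
        rw [ih _ _ _ (by omega)]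
        simp [pvSp, hc]

theorem pvSplitOn_eq (l : List Char) : PySem.Chars.splitOn l ['*'] = pvSp [] l := by
  rw [PySem.Chars.splitOn]
  simpa using pvSplitGo (l.length + 1) l [] [] (by omega)

theorem pvSp_filter : ∀ (l : List Char), '?' ∉ l → ∀ cur,
    (pvSp cur l).filter (fun part => !part.isEmpty) = pvChunksW cur.reverse l := by
  intro l
  induction l with
  | nil =>
    intro _ cur
    by_cases h : cur.reverse = [] <;> simp [pvSp, pvChunksW, h] <;> simp_all
  | cons c t ih =>
    intro hq cur
    have hqt : '?' ∉ t := fun h => hq (by simp [h])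
    by_cases hc : c = '*'
    · subst hc
      have hw : pvWch '*' := by decide
      rw [show pvSp cur ('*' :: t) = cur.reverse :: pvSp [] t from by simp [pvSp]]
      rw [List.filter_cons]
      by_cases h : cur.reverse = []
      · simp only [h]
        rw [ih hqt []]
        simp [pvChunksW, hw, h]
      · have hcur : ¬ cur = [] := by simpa using h
        rw [if_pos (by simp [hcur])]
        rw [ih hqt []]
        simp [pvChunksW, hw, hcur]
    · have hcq : c ≠ '?' := fun h => hq (by simp [h])
      have hw : ¬ pvWch c := by simp [pvWch, hc, hcq]
      simp only [pvSp, if_neg hc, pvChunksW, hw, Bool.false_eq_true, if_false]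
      rw [ih hqt (c :: cur)]
      simp

theorem pvChunksW_map_norm : ∀ (l cur : List Char),
    pvChunksW cur (l.map (fun a => if a = '?' then '*' else a)) = pvChunksW cur l := by
  intro l
  induction l with
  | nil => intro cur; simp
  | cons a t ih =>
    intro cur
    by_cases ha : pvWch a
    · have hn : pvWch (if a = '?' then '*' else a) = true := by
        by_cases h : a = '?' <;> simp [h, pvWch] <;> simpa [pvWch, h] using ha
      simp only [List.map_cons, pvChunksW, hn, ha, if_true]
      rw [ih]
    · have haq : a ≠ '?' := fun h => ha (by simp [pvWch, h])
      simp only [List.map_cons, if_neg haq, pvChunksW, ha, Bool.false_eq_true, if_false]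
      rw [ih]

theorem pvNoQ_map_norm (l : List Char) :
    '?' ∉ l.map (fun a => if a = '?' then '*' else a) := by
  simp
  intro a _ h
  by_cases ha : a = '?' <;> simp [ha] at h

theorem pvChunksW_nil_iff : ∀ (l cur : List Char),
    pvChunksW cur l = [] ↔ cur = [] ∧ ∀ c ∈ l, pvWch c := by
  intro l
  induction l with
  | nil => intro cur; by_cases hc : cur = [] <;> simp [pvChunksW, hc]
  | cons a t ih =>
    intro cur
    by_cases ha : pvWch a
    · by_cases hc : cur = [] <;> simp [pvChunksW, ha, hc, ih]
    · simp [pvChunksW, ha, ih]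

theorem pvChunksW_no_wild : ∀ (l : List Char), (∀ c ∈ l, ¬ pvWch c) → ∀ cur,
    pvChunksW cur l = if cur ++ l = [] then [] else [cur ++ l] := by
  intro l
  induction l with
  | nil => intro _ cur; simp [pvChunksW]
  | cons a t ih =>
    intro h cur
    have ha : ¬ pvWch a := h a (by simp)
    rw [pvChunksW, if_neg (by simp [ha]), ih (fun c hc => h c (by simp [hc])) (cur ++ [a])]
    simp

theorem pvSegsLoop_eq (l : List Char) : ∀ segs cur,
    pvSegsLoop l segs cur = segs ++ pvChunksW cur l := by
  induction l with
  | nil => intro segs cur; by_cases h : cur = [] <;> simp [pvSegsLoop, pvChunksW, h]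
  | cons c t ih =>
    intro segs cur
    by_cases h : pvWch c
    · by_cases hc : cur = [] <;> simp [pvSegsLoop, pvChunksW, h, hc, ih]
    · simp [pvSegsLoop, pvChunksW, h, ih]

-- ===== VERDICT (by name: the statement is the Claim_ definition above) =====
theorem extract_strip_pattern_py_spec : Claim_equal_extract_strip_pattern_py := by
  intro s _
  unfold Spec_extract_strip_pattern_py extract_strip_pattern_py extract_strip_pattern_py_alt
  rw [pvSegsLoop_eq]
  by_cases h0 : s = ""
  · subst h0
    simp [pvChunksW, PySem.List.maxD, PySem.List.max?]
  rw [if_neg h0]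
  by_cases hall : ∀ c ∈ s.toList, pvWch c
  · rw [if_pos ((pvCheck_iff s).mpr hall)]
    have h : pvChunksW [] s.toList = [] := (pvChunksW_nil_iff _ _).mpr ⟨rfl, hall⟩
    simp [h, PySem.List.maxD, PySem.List.max?]
  rw [if_neg (fun h => hall ((pvCheck_iff s).mp h))]
  set p2 := pvTrailLoop (pvLeadLoop s.toList) with hp2
  have hchunks : pvChunksW [] p2 = pvChunksW [] s.toList := by
    rw [hp2, pvChunksW_trail_aux (pvLeadLoop s.toList).length _ (le_refl _),
      pvChunksW_lead_aux s.toList.length _ (le_refl _)]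
  have hne : pvChunksW [] s.toList ≠ [] := by
    intro h
    exact hall ((pvChunksW_nil_iff _ _).mp h).2
  by_cases hin : (PySem.Chars.isIn ['*'] p2 || PySem.Chars.isIn ['?'] p2) = true
  · rw [if_pos hin]
    have hparts :
        (PySem.Chars.splitOn (PySem.Chars.replace p2 ['?'] ['*']) ['*']).filter
          (fun part => !part.isEmpty) = pvChunksW [] s.toList := by
      rw [pvReplace_map, pvSplitOn_eq, pvSp_filter _ (pvNoQ_map_norm p2) []]
      simpa using (pvChunksW_map_norm p2 []).trans hchunks
    rw [hparts]
    rw [if_pos (by simpa using hne)]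
    simp
  · rw [if_neg hin]
    simp only [Bool.or_eq_true, not_or, Bool.not_eq_true] at hin
    rcases hin with ⟨h1, h2⟩
    rw [PySem.Chars.isIn_eq_false_iff, List.singleton_infix_iff] at h1 h2
    have hnw : ∀ c ∈ p2, ¬ pvWch c := by
      intro c hc hw
      rcases Bool.or_eq_true_iff.mp hw with h | h
      · exact h1 (beq_iff_eq.mp h ▸ hc)
      · exact h2 (beq_iff_eq.mp h ▸ hc)
    have hp2ne : p2 ≠ [] := by
      intro h
      rw [h] at hchunks
      exact hne (hchunks.symm.trans (by simp [pvChunksW]))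
    have hsingle : pvChunksW [] s.toList = [p2] := by
      rw [← hchunks, pvChunksW_no_wild p2 hnw []]
      simp [hp2ne]
    rw [hsingle]
    simp [PySem.List.maxD, PySem.List.max?]
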